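-- pv_equiv track=rewrite | github.com/cotemote/cote | jiho/주사위고르기.py | get_combs
-- ===== SOURCE A (Python) =====
-- def get_combs(dice):
--     combs = []
--
--     def backtrack(arr, idx):
--         if len(arr) == len(dice) // 2:
--             A = arr[:]
--             B = [i for i in range(len(dice)) if i not in A]
--             combs.append([A, B])
--             return
--         for i in range(idx, len(dice)):
--             arr.append(i)
--             backtrack(arr, i + 1)
--             arr.pop()
--
--     backtrack([], 0)
--     return combs
-- ===== SOURCE B (Python) =====
-- def get_combs(dice):
--     n = len(dice)
--
--     def comb(xs, k):
--         # all k-subsets of the index list xs, lexicographic, by take-or-skip recursion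
--         if k == 0:
--             return [[]]
--         if not xs:
--             return []
--         return [[xs[0]] + c for c in comb(xs[1:], k - 1)] + comb(xs[1:], k)
--
--     return [[A, [i for i in range(n) if i not in A]]
--             for A in comb(list(range(n)), n // 2)]
-- ===== Notes on version B (the rewrite author's own statement) =====
-- stated objective: alternative
-- what changed: Replaces the mutating for-loop backtracking over a start index with a pure take-or-skip recursion on the index list that builds the combination lists by concatenation (with pruning on the empty list), then pairs each with its complement.
import Mathlib
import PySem

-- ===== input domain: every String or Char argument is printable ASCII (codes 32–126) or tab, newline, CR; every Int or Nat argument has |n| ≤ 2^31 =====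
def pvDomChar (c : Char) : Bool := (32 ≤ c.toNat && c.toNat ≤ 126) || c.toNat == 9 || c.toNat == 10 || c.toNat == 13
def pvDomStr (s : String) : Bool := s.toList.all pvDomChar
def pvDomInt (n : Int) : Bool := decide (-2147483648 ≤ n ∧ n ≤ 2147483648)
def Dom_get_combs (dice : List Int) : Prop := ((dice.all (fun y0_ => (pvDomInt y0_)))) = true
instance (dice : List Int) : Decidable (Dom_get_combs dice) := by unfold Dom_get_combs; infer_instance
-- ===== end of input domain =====

-- B replaces A's mutating index-loop backtracking by a pure take-or-skip recursion on
-- the index list (alternative decomposition, same asymptotic cost).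

-- ===== PORT A =====
-- backtrack(arr, idx): the Python for-loop over i in range(idx, n) is transliterated as
-- head step (i = idx) ++ the rest of the loop; since the leaf guard depends only on arr,
-- the rest of the loop is exactly backtrack(arr, idx+1). idx is a Nat (Python starts it
-- at 0 and only increments).
def pvBacktrack (dice : List Int) (arr : List Int) (idx : Nat) : List (List (List Int)) :=
  if arr.length = dice.length / 2 then
    [[arr, (PySem.List.pyRange 0 dice.length 1).filter (fun i => !(arr.contains i))]]
  else if _h : idx < dice.length then
    pvBacktrack dice (arr ++ [(idx : Int)]) (idx + 1) ++ pvBacktrack dice arr (idx + 1)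
  else []
termination_by dice.length - idx

def get_combs (dice : List Int) : List (List (List Int)) :=
  pvBacktrack dice [] 0

-- ===== PORT B =====
-- comb(xs, k): all k-subsets of xs in lexicographic order, take-or-skip recursion.
def pvComb : List Int → Nat → List (List Int)
  | _, 0 => [[]]
  | [], _ + 1 => []
  | x :: xs, m + 1 => (pvComb xs m).map (fun c => x :: c) ++ pvComb xs (m + 1)

def get_combs_alt (dice : List Int) : List (List (List Int)) :=
  (pvComb (PySem.List.pyRange 0 dice.length 1) (dice.length / 2)).map
    (fun A => [A, (PySem.List.pyRange 0 dice.length 1).filter (fun i => !(A.contains i))])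

-- ===== PRECONDITION & SPEC =====
def Spec_get_combs (dice : List Int) (out : List (List (List Int))) : Prop := out = get_combs_alt dice
instance (dice : List Int) (out : List (List (List Int))) : Decidable (Spec_get_combs dice out) := by unfold Spec_get_combs; infer_instance

-- ===== CLAIM (what is proved, stated in full; the proofs are below) =====
def Claim_equal_get_combs : Prop := ∀ (dice : List Int), Dom_get_combs dice → Spec_get_combs dice (get_combs dice)

-- ===== LEMMAS AND PROOFS =====

-- the pair a completed combination A contributes: [A, complement of A in range(n)]
def pvPairOf (n : Nat) (A : List Int) : List (List Int) :=
  [A, (PySem.List.pyRange 0 n 1).filter (fun i => !(A.contains i))]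

lemma pvBacktrack_eq (fuel : Nat) :
    ∀ (dice : List Int) (idx : Nat) (arr : List Int),
      dice.length - idx ≤ fuel → arr.length ≤ dice.length / 2 →
      pvBacktrack dice arr idx =
        (pvComb (PySem.List.pyRange (idx : Int) dice.length 1)
            (dice.length / 2 - arr.length)).map
          (fun c => pvPairOf dice.length (arr ++ c)) := by
  induction fuel with
  | zero =>
    intro dice idx arr hf hle
    by_cases hleaf : arr.length = dice.length / 2
    · have hz : dice.length / 2 - arr.length = 0 := by omega
      rw [pvBacktrack, if_pos hleaf, hz]
      simp [pvComb, pvPairOf]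
    · have hidx : ¬ idx < dice.length := by omega
      obtain ⟨m, hm⟩ : ∃ m, dice.length / 2 - arr.length = m + 1 :=
        ⟨dice.length / 2 - arr.length - 1, by omega⟩
      rw [pvBacktrack, if_neg hleaf, dif_neg hidx, hm,
        PySem.List.pyRange_one_eq_nil (by exact_mod_cast Nat.le_of_not_lt hidx)]
      simp [pvComb]
  | succ fuel ih =>
    intro dice idx arr hf hle
    by_cases hleaf : arr.length = dice.length / 2
    · have hz : dice.length / 2 - arr.length = 0 := by omega
      rw [pvBacktrack, if_pos hleaf, hz]
      simp [pvComb, pvPairOf]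
    · by_cases hidx : idx < dice.length
      · obtain ⟨m, hm⟩ : ∃ m, dice.length / 2 - arr.length = m + 1 :=
          ⟨dice.length / 2 - arr.length - 1, by omega⟩
        have hcons : PySem.List.pyRange (idx : Int) dice.length 1 =
            (idx : Int) :: PySem.List.pyRange ((idx : Int) + 1) dice.length 1 :=
          PySem.List.pyRange_one_cons (by exact_mod_cast hidx)
        rw [pvBacktrack, if_neg hleaf, dif_pos hidx, hm, hcons, pvComb]
        have h1 := ih dice (idx + 1) (arr ++ [(idx : Int)]) (by omega)
          (by simp; omega)
        have h2 := ih dice (idx + 1) arr (by omega) hle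
        have hm1 : dice.length / 2 - (arr ++ [(idx : Int)]).length = m := by
          simp; omega
        rw [h1, h2, hm1, hm]
        push_cast
        simp [List.map_map, Function.comp_def]
      · obtain ⟨m, hm⟩ : ∃ m, dice.length / 2 - arr.length = m + 1 :=
          ⟨dice.length / 2 - arr.length - 1, by omega⟩
        rw [pvBacktrack, if_neg hleaf, dif_neg hidx, hm,
          PySem.List.pyRange_one_eq_nil (by exact_mod_cast Nat.le_of_not_lt hidx)]
        simp [pvComb]

theorem get_combs_spec : Claim_equal_get_combs := by
  intro dice _
  show get_combs dice = get_combs_alt dice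
  have h := pvBacktrack_eq dice.length dice 0 [] (by omega) (by simp)
  rw [get_combs, h]
  simp [get_combs_alt, pvPairOf]
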